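-- pv_equiv track=rewrite | github.com/jeyan-s/Competitive-Programming-Solutions | Codefores Solutions/2023-07-06-Codeforces Round 882 (Div. 2)/B-Hamon Odyssey.py | solve
-- ===== SOURCE A (Python) =====
-- def solve(lst, n):
--     lst.append(0)
--     rslt = 0
--     And = lst[0]
--     for x in range(n):
--         And &= lst[x]
--         if And == 0:
--             rslt += 1
--             And = lst[x + 1]
--     return max(rslt, 1)
-- ===== SOURCE B (Python) =====
-- def solve(lst, n):
--     lst.append(0)
--     last = [-1] * 33
--     start = 0
--     count = 0
--     for i in range(n):
--         v = lst[i]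
--         m = 1
--         for b in range(33):
--             if v & m == 0:
--                 last[b] = i
--             m += m
--         if min(last) >= start:
--             count += 1
--             start = i + 1
--     return max(count, 1)
-- ===== Notes on version B (the rewrite author's own statement) =====
-- stated objective: alternative
-- what changed: B drops A's running-AND accumulator entirely: it tracks, for each of the 33 relevant bit positions, the last index whose bit was 0, and cuts a segment exactly when the minimum of those indices reaches the segment start (every bit cleared since the last cut).
import Mathlib
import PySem

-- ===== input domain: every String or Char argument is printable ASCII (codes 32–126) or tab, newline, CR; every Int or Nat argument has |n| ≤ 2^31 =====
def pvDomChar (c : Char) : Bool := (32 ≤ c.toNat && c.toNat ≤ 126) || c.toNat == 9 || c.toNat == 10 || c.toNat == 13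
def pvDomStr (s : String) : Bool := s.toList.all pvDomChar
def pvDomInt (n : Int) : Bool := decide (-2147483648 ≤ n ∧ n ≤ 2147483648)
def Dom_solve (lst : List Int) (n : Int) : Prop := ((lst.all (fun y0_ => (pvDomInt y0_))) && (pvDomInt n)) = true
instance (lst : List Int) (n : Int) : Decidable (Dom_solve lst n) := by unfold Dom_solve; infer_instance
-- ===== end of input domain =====

-- B replaces A's running-AND accumulator (seed lst[0], lookahead reset And = lst[x+1]) by per-bit
-- bookkeeping: it records, for each of the 33 relevant bit positions, the last index whose bit was 0,
-- and cuts a segment exactly when every bit has been cleared since the segment's start (alternative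
-- algorithm, same O(n) cost up to the 33x constant). Both Pythons append 0 to lst in place; the
-- mutation is identical, the claim is about the return value.

-- ===== PORT A =====
def solve (lst : List Int) (n : Int) : Int :=
  let ys := lst ++ [0]
  let s := (PySem.List.pyRange 0 n 1).foldl
    (fun (s : Int × Int) x =>
      let a := PySem.Int.band s.2 (PySem.List.pyGetD ys x 0)
      if a = 0 then (s.1 + 1, PySem.List.pyGetD ys (x + 1) 0) else (s.1, a))
    (0, PySem.List.pyGetD ys 0 0)
  max s.1 1

-- ===== PORT B =====
def solve_alt (lst : List Int) (n : Int) : Int :=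
  let ys := lst ++ [0]
  let s := (PySem.List.pyRange 0 n 1).foldl
    (fun (st : List Int × Int × Int) i =>
      let v := PySem.List.pyGetD ys i 0
      let last := ((PySem.List.pyRange 0 33 1).foldl
        (fun (p : List Int × Int) b =>
          ((if PySem.Int.band v p.2 = 0 then PySem.List.pySetD p.1 b i else p.1), p.2 + p.2))
        (st.1, 1)).1
      if (match PySem.List.min? last (fun x => x) with
          | some m => m
          | none => 0) ≥ st.2.1
      then (last, i + 1, st.2.2 + 1)
      else (last, st.2.1, st.2.2))
    (List.replicate 33 (-1), 0, 0)
  max s.2.2 1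

-- ===== PRECONDITION & SPEC =====
-- A raises IndexError exactly when n > len(lst): for n = len(lst)+1 the appended 0 makes the last
-- iteration reset and read lst[x+1] out of range, and for larger n lst[x] itself is out of range.
def Pre_solve (lst : List Int) (n : Int) : Prop := n ≤ (lst.length : Int)
instance (lst : List Int) (n : Int) : Decidable (Pre_solve lst n) := by unfold Pre_solve; infer_instance
def pvWitness_solve : List Int × Int := ([1, 2, 3], 3)

def Spec_solve (lst : List Int) (n : Int) (out : Int) : Prop := out = solve_alt lst n
instance (lst : List Int) (n : Int) (out : Int) : Decidable (Spec_solve lst n out) := by unfold Spec_solve; infer_instance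

-- ===== CLAIM (what is proved, stated in full; the proofs are below) =====
def Claim_equal_solve : Prop := ∀ (lst : List Int) (n : Int), Dom_solve lst n → Pre_solve lst n → Spec_solve lst n (solve lst n)

-- ===== LEMMAS AND PROOFS =====

-- the 32-bit range Dom guarantees for every list element (and for the appended 0)
def pvInR (v : Int) : Prop := -2147483648 ≤ v ∧ v ≤ 2147483648

-- the values A's accumulator has ANDed since the last cut: segment [s, a) of ys
def pvSeg (ys : List Int) (s a : Int) : List Int :=
  (PySem.List.pyRange s a 1).map (fun j => PySem.List.pyGetD ys j 0)

-- ---- bit-level facts ----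

theorem pv_ldiff_add_and (m : Nat) : ∀ n : Nat, Nat.ldiff m n + (m &&& n) = m := by
  induction m using Nat.strong_induction_on with
  | _ m ih =>
    intro n
    rcases Nat.eq_zero_or_pos m with hm | hm
    · subst hm
      have h1 : Nat.ldiff 0 n = 0 :=
        Nat.zero_of_testBit_eq_false (fun i => by
          rw [Nat.testBit_ldiff, Nat.zero_testBit, Bool.false_and])
      simp [h1]
    · have hd : Nat.div2 m < m := Nat.binaryRec_decreasing (by omega)
      have ihm := ih (Nat.div2 m) hd (Nat.div2 n)
      have hm2 : 2 * Nat.div2 m + (Nat.bodd m).toNat = m :=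
        (Nat.bit_val _ _).symm.trans (Nat.bit_bodd_div2 m)
      conv_lhs => rw [← Nat.bit_bodd_div2 m, ← Nat.bit_bodd_div2 n]
      rw [Nat.ldiff_bit, Nat.land_bit, Nat.bit_val, Nat.bit_val]
      cases hbm : Nat.bodd m <;> cases hbn : Nat.bodd n <;>
        rw [hbm] at hm2 <;> simp at hm2 ⊢ <;> omega

theorem pv_band_eq_land (a b : Int) : PySem.Int.band a b = Int.land a b := by
  have hsub : ∀ m n : Nat, m - (m &&& n) = Nat.ldiff m n := by
    intro m n
    have h := pv_ldiff_add_and m n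
    omega
  cases a with
  | ofNat m =>
    cases b with
    | ofNat n =>
      simp [PySem.Int.band, Int.land, Int.ofNat_eq_natCast]
    | negSucc n =>
      have h1 : (-(Int.negSucc n) - 1) = (n : Int) := by
        rw [Int.negSucc_eq]; ring
      have h0 : ¬ (0 : Int) ≤ Int.negSucc n := by
        rw [Int.negSucc_eq]; omega
      simp [PySem.Int.band, Int.land, Int.ofNat_eq_natCast, h0, hsub]
  | negSucc m =>
    have h0 : ¬ (0 : Int) ≤ Int.negSucc m := by
      rw [Int.negSucc_eq]; omega
    have h1 : (-(Int.negSucc m) - 1) = (m : Int) := by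
      rw [Int.negSucc_eq]; ring
    cases b with
    | ofNat n =>
      simp [PySem.Int.band, Int.land, Int.ofNat_eq_natCast, h0, hsub]
    | negSucc n =>
      have h2 : (-(Int.negSucc n) - 1) = (n : Int) := by
        rw [Int.negSucc_eq]; ring
      have h3 : ¬ (0 : Int) ≤ Int.negSucc n := by
        rw [Int.negSucc_eq]; omega
      simp [PySem.Int.band, Int.land, Int.negSucc_eq]
      rw [if_neg (show ¬((m : Int) ≤ -1) by omega), if_neg (show ¬((n : Int) ≤ -1) by omega)]
      omega

theorem pv_tb_band (a b : Int) (k : Nat) :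
    (PySem.Int.band a b).testBit k = (a.testBit k && b.testBit k) := by
  rw [pv_band_eq_land]; exact Int.testBit_land a b k

theorem pv_zero_iff (x : Int) : x = 0 ↔ ∀ k, x.testBit k = false := by
  constructor
  · rintro rfl k
    show (Int.ofNat 0).testBit k = false
    simp [Int.testBit, Nat.zero_testBit]
  · intro h
    cases x with
    | ofNat m =>
      have hm : m = 0 := Nat.zero_of_testBit_eq_false (fun i => by
        have := h i; simpa [Int.testBit] using this)
      simp [hm]
    | negSucc m =>
      exfalso
      have hmm : Nat.testBit m m = false := Nat.testBit_lt_two_pow Nat.lt_two_pow_self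
      have h3 := h m
      simp [Int.testBit, hmm] at h3

theorem pv_tb_neg_one (k : Nat) : (-1 : Int).testBit k = true := by
  show (Int.negSucc 0).testBit k = true
  simp [Int.testBit, Nat.zero_testBit]

theorem pv_tb_foldl (S : List Int) : ∀ (i : Int) (k : Nat),
    (S.foldl PySem.Int.band i).testBit k = (i.testBit k && S.all (fun v => v.testBit k)) := by
  induction S with
  | nil => intro i k; simp
  | cons v S ih =>
    intro i k
    simp only [List.foldl_cons, List.all_cons]
    rw [ih, pv_tb_band, Bool.and_assoc]

theorem pv_band_pow (v : Int) (b : Nat) :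
    (PySem.Int.band v ((2 : Int) ^ b) = 0) ↔ v.testBit b = false := by
  have hp : ((2 : Int) ^ b) = ((2 ^ b : Nat) : Int) := by push_cast; ring
  have htb : ∀ k, ((2 : Int) ^ b).testBit k = decide (b = k) := by
    intro k
    rw [hp]
    show (Int.ofNat (2 ^ b)).testBit k = decide (b = k)
    simp [Int.testBit, Nat.testBit_two_pow]
  rw [pv_zero_iff]
  constructor
  · intro h
    have hb := h b
    rw [pv_tb_band, htb] at hb
    simpa using hb
  · intro h k
    rw [pv_tb_band, htb]
    by_cases hk : b = k
    · subst hk; simp [h]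
    · simp [hk]

theorem pv_hi_neg (v : Int) (hv : pvInR v) (hneg : v < 0) (k : Nat) (hk : 31 ≤ k) :
    v.testBit k = true := by
  obtain ⟨h1, h2⟩ := hv
  cases v with
  | ofNat m =>
    exfalso
    have : (0 : Int) ≤ Int.ofNat m := Int.natCast_nonneg m
    omega
  | negSucc m =>
    have he := Int.negSucc_eq m
    rw [he] at h1
    have hmI : (m : Int) ≤ 2147483647 := by omega
    have hm : m < 2 ^ 31 := by
      have : m ≤ 2147483647 := by exact_mod_cast hmI
      omega
    have hle : (2 : Nat) ^ 31 ≤ 2 ^ k := Nat.pow_le_pow_right (by norm_num) hk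
    have hb : Nat.testBit m k = false := Nat.testBit_lt_two_pow (lt_of_lt_of_le hm hle)
    simp [Int.testBit, hb]

theorem pv_hi_nonneg (v : Int) (hv : pvInR v) (h0 : 0 ≤ v) (k : Nat) (hk : 32 ≤ k) :
    v.testBit k = false := by
  obtain ⟨h1, h2⟩ := hv
  cases v with
  | ofNat m =>
    have hmI : (m : Int) ≤ 2147483648 := h2
    have hm : m < 2 ^ 32 := by
      have : m ≤ 2147483648 := by exact_mod_cast hmI
      omega
    have hle : (2 : Nat) ^ 32 ≤ 2 ^ k := Nat.pow_le_pow_right (by norm_num) hk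
    have hb : Nat.testBit m k = false := Nat.testBit_lt_two_pow (lt_of_lt_of_le hm hle)
    simpa [Int.testBit] using hb
  | negSucc m =>
    exfalso
    have := Int.negSucc_lt_zero m
    omega

-- AND of a segment is 0 iff each of the 33 low bits is cleared by some element
theorem pv_key (S : List Int) (h : ∀ v ∈ S, pvInR v) :
    (S.foldl PySem.Int.band (-1) = 0) ↔ ∀ b : Nat, b < 33 → ∃ v ∈ S, v.testBit b = false := by
  have hfold : ∀ k, (S.foldl PySem.Int.band (-1)).testBit k = S.all (fun v => v.testBit k) := by
    intro k
    rw [pv_tb_foldl, pv_tb_neg_one, Bool.true_and]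
  rw [pv_zero_iff]
  constructor
  · intro hz b _
    have hb := hz b
    rw [hfold] at hb
    rcases List.all_eq_false.mp hb with ⟨v, hv, hvb⟩
    exact ⟨v, hv, by simpa using hvb⟩
  · intro he k
    rw [hfold]
    by_cases hk : k < 33
    · obtain ⟨v, hv, hvb⟩ := he k hk
      exact List.all_eq_false.mpr ⟨v, hv, by simp [hvb]⟩
    · obtain ⟨w, hw, hwb⟩ := he 32 (by norm_num)
      have hw0 : 0 ≤ w := by
        by_contra hneg
        push_neg at hneg
        have ht := pv_hi_neg w (h w hw) hneg 32 (by norm_num)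
        rw [ht] at hwb
        simp at hwb
      have hwk : w.testBit k = false := pv_hi_nonneg w (h w hw) hw0 k (by omega)
      exact List.all_eq_false.mpr ⟨w, hw, by simp [hwk]⟩

-- ---- the inner per-bit loop of B ----

theorem pv_inner (v i : Int) : ∀ (nb : Nat) (last : List Int), (nb : Int) ≤ (last.length : Int) →
    (((List.range nb).map (fun j : Nat => (j : Int))).foldl
        (fun (p : List Int × Int) b =>
          ((if PySem.Int.band v p.2 = 0 then PySem.List.pySetD p.1 b i else p.1), p.2 + p.2))
        (last, 1)).2 = (2 : Int) ^ nb ∧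
    (((List.range nb).map (fun j : Nat => (j : Int))).foldl
        (fun (p : List Int × Int) b =>
          ((if PySem.Int.band v p.2 = 0 then PySem.List.pySetD p.1 b i else p.1), p.2 + p.2))
        (last, 1)).1.length = last.length ∧
    ∀ j : Nat,
      (((List.range nb).map (fun j : Nat => (j : Int))).foldl
        (fun (p : List Int × Int) b =>
          ((if PySem.Int.band v p.2 = 0 then PySem.List.pySetD p.1 b i else p.1), p.2 + p.2))
        (last, 1)).1[j]? =
      if j < nb ∧ v.testBit j = false then (if j < last.length then some i else none) else last[j]? := by
  intro nb
  induction nb with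
  | zero =>
    intro last h
    refine ⟨by simp, by simp, ?_⟩
    intro j
    simp
  | succ nb ih =>
    intro last h
    have hnblt : nb < last.length := by
      have : ((nb : Nat) : Int) + 1 ≤ (last.length : Int) := by push_cast at h ⊢; omega
      omega
    obtain ⟨hm, hlen, hget⟩ := ih last (by push_cast at h ⊢; omega)
    have hsplit : ((List.range (nb + 1)).map (fun j : Nat => (j : Int)))
        = ((List.range nb).map (fun j : Nat => (j : Int))) ++ [(nb : Int)] := by
      rw [List.range_succ, List.map_append]
      rfl
    simp only [hsplit, List.foldl_append, List.foldl_cons, List.foldl_nil]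
    set P : List Int × Int := (((List.range nb).map (fun j : Nat => (j : Int))).foldl
        (fun (p : List Int × Int) b =>
          ((if PySem.Int.band v p.2 = 0 then PySem.List.pySetD p.1 b i else p.1), p.2 + p.2))
        (last, 1)) with hP
    refine ⟨by rw [hm]; ring, ?_, ?_⟩
    · by_cases hb : PySem.Int.band v P.2 = 0
      · rw [if_pos hb, PySem.List.length_pySetD]
        exact hlen
      · rw [if_neg hb]
        exact hlen
    · intro j
      rw [hm]
      by_cases hb : PySem.Int.band v ((2 : Int) ^ nb) = 0
      · have htb : v.testBit nb = false := (pv_band_pow v nb).1 hb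
        rw [if_pos hb, PySem.List.pySetD_natCast, List.getElem?_set, hget j, hlen]
        by_cases hj : nb = j
        · subst hj
          simp [htb, hnblt]
        · have hiff : (j < nb + 1 ∧ v.testBit j = false) ↔ (j < nb ∧ v.testBit j = false) := by
            constructor
            · rintro ⟨h1, h2⟩
              have : j ≠ nb := fun hh => hj hh.symm
              exact ⟨by omega, h2⟩
            · rintro ⟨h1, h2⟩
              exact ⟨by omega, h2⟩
          rw [if_neg hj]
          simp only [hiff]
      · have htb : v.testBit nb = true := by
          by_contra hc
          exact hb ((pv_band_pow v nb).2 (by simpa using hc))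
        rw [if_neg hb, hget j]
        by_cases hj : j = nb
        · subst hj
          simp [htb]
        · have hiff : (j < nb ∧ v.testBit j = false) ↔ (j < nb + 1 ∧ v.testBit j = false) := by
            constructor
            · rintro ⟨h1, h2⟩
              exact ⟨by omega, h2⟩
            · rintro ⟨h1, h2⟩
              refine ⟨by omega, h2⟩
          simp only [hiff]

-- the concrete range of B's inner loop
theorem pv_range33 : PySem.List.pyRange 0 33 1 = (List.range 33).map (fun j : Nat => (j : Int)) := by
  have h := PySem.List.pyRange_zero_natCast 33
  simpa using h

-- ---- A's fused loop equals the reset-to-(-1) loop ----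

theorem abloop (ys : List Int) :
    ∀ (k : Nat) (a r c A cur : Int), r = c →
    (A = cur ∨ (cur = -1 ∧ A = PySem.List.pyGetD ys a 0)) →
    ((PySem.List.pyRange a (a + (k : Int)) 1).foldl (fun (s : Int × Int) x =>
        let a := PySem.Int.band s.2 (PySem.List.pyGetD ys x 0)
        if a = 0 then (s.1 + 1, PySem.List.pyGetD ys (x + 1) 0) else (s.1, a)) (r, A)).1 =
    ((PySem.List.pyRange a (a + (k : Int)) 1).foldl (fun (s : Int × Int) x =>
        let c := PySem.Int.band s.2 (PySem.List.pyGetD ys x 0)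
        if c = 0 then (s.1 + 1, -1) else (s.1, c)) (c, cur)).1 := by
  intro k
  induction k with
  | zero =>
    intro a r c A cur hrc _
    rw [PySem.List.pyRange_one_eq_nil (by omega)]
    simpa using hrc
  | succ k ih =>
    intro a r c A cur hrc hrel
    rw [PySem.List.pyRange_one_cons (by omega)]
    have hb : a + ((k : Int) + 1) = (a + 1) + (k : Int) := by omega
    push_cast
    rw [hb]
    simp only [List.foldl_cons]
    have hAB : PySem.Int.band A (PySem.List.pyGetD ys a 0)
             = PySem.Int.band cur (PySem.List.pyGetD ys a 0) := by
      rcases hrel with h | ⟨h1, h2⟩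
      · rw [h]
      · rw [h1, h2, PySem.Int.band_self, PySem.Int.band_comm, PySem.Int.band_neg_one]
    rw [hAB]
    by_cases hv : PySem.Int.band cur (PySem.List.pyGetD ys a 0) = 0
    · simp only [hv]
      exact ih (a+1) (r+1) (c+1) _ (-1) (by omega) (Or.inr ⟨rfl, rfl⟩)
    · simp only [if_neg hv]
      exact ih (a+1) r c _ _ hrc (Or.inl rfl)

-- ---- the reset-to-(-1) loop equals B's per-bit loop ----

theorem pv_main (ys : List Int) :
    ∀ (k : Nat) (a start c count : Int) (last : List Int),
    (∀ x : Int, a ≤ x → x < a + (k : Int) → pvInR (PySem.List.pyGetD ys x 0)) →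
    (∀ v ∈ pvSeg ys start a, pvInR v) →
    last.length = 33 →
    0 ≤ start → start ≤ a →
    c = (pvSeg ys start a).foldl PySem.Int.band (-1) →
    (∀ b : Nat, b < 33 → ∃ w : Int, last[b]? = some w ∧ w < a ∧
        (start ≤ w ↔ ∃ v ∈ pvSeg ys start a, v.testBit b = false)) →
    ((PySem.List.pyRange a (a + (k : Int)) 1).foldl (fun (s : Int × Int) x =>
        let c := PySem.Int.band s.2 (PySem.List.pyGetD ys x 0)
        if c = 0 then (s.1 + 1, -1) else (s.1, c)) (count, c)).1 =
    ((PySem.List.pyRange a (a + (k : Int)) 1).foldl (fun (st : List Int × Int × Int) i =>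
      let v := PySem.List.pyGetD ys i 0
      let last := ((PySem.List.pyRange 0 33 1).foldl
        (fun (p : List Int × Int) b =>
          ((if PySem.Int.band v p.2 = 0 then PySem.List.pySetD p.1 b i else p.1), p.2 + p.2))
        (st.1, 1)).1
      if (match PySem.List.min? last (fun x => x) with
          | some m => m
          | none => 0) ≥ st.2.1
      then (last, i + 1, st.2.2 + 1)
      else (last, st.2.1, st.2.2)) (last, start, count)).2.2 := by
  intro k
  induction k with
  | zero =>
    intro a start c count last _ _ _ _ _ _ _
    rw [PySem.List.pyRange_one_eq_nil (by omega)]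
    simp
  | succ k ih =>
    intro a start c count last h5 hseg hlen h0s hsa hc hlast
    rw [PySem.List.pyRange_one_cons (by omega)]
    have hb : a + ((k : Int) + 1) = (a + 1) + (k : Int) := by omega
    push_cast
    rw [hb]
    simp only [List.foldl_cons]
    -- inner loop characterization at this step
    have hfold1 : ((PySem.List.pyRange 0 33 1).foldl
        (fun (p : List Int × Int) b =>
          ((if PySem.Int.band (PySem.List.pyGetD ys a 0) p.2 = 0
            then PySem.List.pySetD p.1 b a else p.1), p.2 + p.2)) (last, 1))
        = (((List.range 33).map (fun j : Nat => (j : Int))).foldl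
        (fun (p : List Int × Int) b =>
          ((if PySem.Int.band (PySem.List.pyGetD ys a 0) p.2 = 0
            then PySem.List.pySetD p.1 b a else p.1), p.2 + p.2)) (last, 1)) := by
      rw [pv_range33]
    rw [hfold1]
    obtain ⟨_, hlen', hget'⟩ := pv_inner (PySem.List.pyGetD ys a 0) a 33 last
      (by rw [hlen])
    set L : List Int := (((List.range 33).map (fun j : Nat => (j : Int))).foldl
        (fun (p : List Int × Int) b =>
          ((if PySem.Int.band (PySem.List.pyGetD ys a 0) p.2 = 0
            then PySem.List.pySetD p.1 b a else p.1), p.2 + p.2)) (last, 1)).1 with hL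
    -- the extended segment
    have hseg' : pvSeg ys start (a + 1) = pvSeg ys start a ++ [PySem.List.pyGetD ys a 0] := by
      unfold pvSeg
      rw [PySem.List.pyRange_one_succ_right hsa, List.map_append]
      simp
    have hvin : pvInR (PySem.List.pyGetD ys a 0) := h5 a le_rfl (by omega)
    have hinr' : ∀ w ∈ pvSeg ys start (a + 1), pvInR w := by
      rw [hseg']
      intro w hw
      rcases List.mem_append.mp hw with hw | hw
      · exact hseg w hw
      · rcases List.mem_singleton.mp hw with rfl
        exact hvin
    have hc' : PySem.Int.band c (PySem.List.pyGetD ys a 0)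
        = (pvSeg ys start (a + 1)).foldl PySem.Int.band (-1) := by
      rw [hseg', List.foldl_append, ← hc]
      simp
    -- elementwise description of L
    have hLel : ∀ b : Nat, b < 33 → ∃ w : Int, L[b]? = some w ∧ w ≤ a ∧
        (start ≤ w ↔ ∃ v ∈ pvSeg ys start (a + 1), v.testBit b = false) := by
      intro b hb33
      obtain ⟨w, hwget, hwlt, hwiff⟩ := hlast b hb33
      have hblt : b < last.length := by omega
      by_cases htb : (PySem.List.pyGetD ys a 0).testBit b = false
      · refine ⟨a, ?_, le_rfl, ?_⟩
        · rw [hget' b]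
          simp [hb33, htb, hblt]
        · constructor
          · intro _
            refine ⟨PySem.List.pyGetD ys a 0, ?_, htb⟩
            rw [hseg']
            exact List.mem_append.mpr (Or.inr (List.mem_singleton.mpr rfl))
          · intro _
            exact hsa
      · refine ⟨w, ?_, by omega, ?_⟩
        · rw [hget' b]
          simp [htb, hwget]
        · rw [hwiff, hseg']
          constructor
          · rintro ⟨v, hv, hvb⟩
            exact ⟨v, List.mem_append.mpr (Or.inl hv), hvb⟩
          · rintro ⟨v, hv, hvb⟩
            rcases List.mem_append.mp hv with hv | hv
            · exact ⟨v, hv, hvb⟩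
            · rcases List.mem_singleton.mp hv with rfl
              exact absurd hvb htb
    -- the minimum test is equivalent to the AND test
    have hLne : L ≠ [] := by
      intro hnil
      rw [hnil] at hlen'
      simp [hlen] at hlen'
    obtain ⟨mn, hmn⟩ : ∃ mn, PySem.List.min? L (fun x => x) = some mn := by
      cases hopt : PySem.List.min? L (fun x => x) with
      | none => exact absurd ((PySem.List.min?_eq_none_iff L _).mp hopt) hLne
      | some mn => exact ⟨mn, rfl⟩
    have hLlen33 : L.length = 33 := by rw [hlen', hlen]
    have hmem_iff : (start ≤ mn) ↔ (∀ x ∈ L, start ≤ x) := by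
      constructor
      · intro hs x hx
        exact le_trans hs (PySem.List.min?_isMin hmn x hx)
      · intro hall
        exact hall mn (PySem.List.min?_mem hmn)
    have hall_iff : (∀ x ∈ L, start ≤ x) ↔
        (∀ b : Nat, b < 33 → ∃ v ∈ pvSeg ys start (a + 1), v.testBit b = false) := by
      constructor
      · intro hall b hb33
        obtain ⟨w, hwget, _, hwiff⟩ := hLel b hb33
        exact hwiff.mp (hall w (List.mem_of_getElem? hwget))
      · intro hex x hx
        obtain ⟨j, hj, hjx⟩ := List.getElem_of_mem hx
        obtain ⟨w, hwget, _, hwiff⟩ := hLel j (by omega)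
        have h1 : L[j]? = some x := by rw [List.getElem?_eq_getElem hj, hjx]
        rw [h1] at hwget
        have hxw : x = w := Option.some.inj hwget
        rw [hxw]
        exact hwiff.mpr (hex j (by omega))
    have hcond : ((match PySem.List.min? L (fun x => x) with
          | some m => m
          | none => 0) ≥ start) ↔ (PySem.Int.band c (PySem.List.pyGetD ys a 0) = 0) := by
      rw [hmn]
      show (start ≤ mn) ↔ _
      rw [hmem_iff, hall_iff, hc']
      exact (pv_key _ hinr').symm
    have h5' : ∀ x : Int, a + 1 ≤ x → x < (a + 1) + (k : Int) →
        pvInR (PySem.List.pyGetD ys x 0) := by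
      intro x h1 h2
      exact h5 x (by omega) (by push_cast; omega)
    by_cases hc0 : PySem.Int.band c (PySem.List.pyGetD ys a 0) = 0
    · rw [if_pos hc0, if_pos (hcond.mpr hc0)]
      refine ih (a + 1) (a + 1) (-1) (count + 1) L h5' ?_ hLlen33 (by omega) le_rfl ?_ ?_
      · intro v hv
        unfold pvSeg at hv
        rw [PySem.List.pyRange_one_eq_nil le_rfl] at hv
        simp at hv
      · unfold pvSeg
        rw [PySem.List.pyRange_one_eq_nil le_rfl]
        simp
      · intro b hb33
        obtain ⟨w, hwget, hwle, _⟩ := hLel b hb33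
        refine ⟨w, hwget, by omega, ?_⟩
        unfold pvSeg
        rw [PySem.List.pyRange_one_eq_nil le_rfl]
        constructor
        · intro hle
          omega
        · rintro ⟨v, hv, -⟩
          simp at hv
    · rw [if_neg hc0, if_neg (fun hcc => hc0 (hcond.mp hcc))]
      refine ih (a + 1) start (PySem.Int.band c (PySem.List.pyGetD ys a 0)) count L
        h5' ?_ hLlen33 h0s (by omega) hc' ?_
      · exact hinr'
      · intro b hb33
        obtain ⟨w, hwget, hwle, hwiff⟩ := hLel b hb33
        exact ⟨w, hwget, by omega, hwiff⟩

-- ===== VERDICT (by name: the statement is the Claim_ definition above) =====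
theorem solve_spec : Claim_equal_solve := by
  intro lst n hdom hpre
  unfold Spec_solve solve solve_alt
  by_cases hn : n ≤ 0
  · rw [PySem.List.pyRange_one_eq_nil hn]
    simp
  · replace hn : 0 < n := by omega
    have hk : n = 0 + ((n.toNat : Int)) := by omega
    unfold Dom_solve at hdom
    rw [Bool.and_eq_true] at hdom
    have hdl := hdom.1
    rw [List.all_eq_true] at hdl
    have hys : ∀ x : Int, (0 : Int) ≤ x → x < 0 + ((n.toNat : Int)) →
        pvInR (PySem.List.pyGetD (lst ++ [0]) x 0) := by
      intro x h1 h2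
      have hlen2 : (lst ++ [0]).length = lst.length + 1 := by simp
      have hxl : x < ((lst ++ [0]).length : Int) := by
        unfold Pre_solve at hpre
        omega
      have hmem : PySem.List.pyGetD (lst ++ [0]) x 0 ∈ lst ++ [0] :=
        PySem.List.pyGetD_mem (lst ++ [0]) 0 (by
          simp only [PySem.Raise.InRange]
          omega)
      rcases List.mem_append.mp hmem with hm | hm
      · have := hdl _ hm
        unfold pvDomInt at this
        unfold pvInR
        exact of_decide_eq_true this
      · rcases List.mem_singleton.mp hm with h
        rw [h]
        unfold pvInR
        norm_num
    have hsege : pvSeg (lst ++ [0]) 0 0 = [] := by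
      unfold pvSeg
      rw [PySem.List.pyRange_one_eq_nil le_rfl]
      rfl
    have hA := abloop (lst ++ [0]) n.toNat 0 0 0 (PySem.List.pyGetD (lst ++ [0]) 0 0) (-1)
      rfl (Or.inr ⟨rfl, rfl⟩)
    have hM := pv_main (lst ++ [0]) n.toNat 0 0 (-1) 0 (List.replicate 33 (-1)) hys
      (by rw [hsege]; intro v hv; simp at hv)
      (by simp) le_rfl le_rfl
      (by rw [hsege]; simp)
      (by
        intro b hb
        refine ⟨-1, ?_, by norm_num, ?_⟩
        · rw [List.getElem?_replicate, if_pos hb]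
        · rw [hsege]
          constructor
          · intro h; omega
          · rintro ⟨v, hv, -⟩; simp at hv)
    dsimp only
    rw [hk, hA, hM]
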